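-- pv_equiv track=rewrite | github.com/claudiajkang/DA-AR | Algorithms/Implementation/HR_manasa-and-stones.py | stones
-- ===== SOURCE A (Python) =====
-- def stones(n, a, b):
--     res = list()
--     width = n - 1
--     cases = list()
--     c = 0
--
--     for i in range(width+1):
--         plist = list()
--         for j in range(c):
--             plist.append(1)
--
--         for k in range(c, width):
--             plist.append(0)
--
--         c += 1
--         cases.append(plist)
--
--     for k in cases:
--         p = 0
--         for i in k:
--             if i:
--                 p += a
--             else:
--                 p += b
--         res.append(p)
--
--     results = sorted(list(set(res)))
--
--     return results
-- ===== SOURCE B (Python) =====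
-- def stones(n, a, b):
--     width = n - 1
--     return sorted({c * a + (width - c) * b for c in range(n)})
-- ===== Notes on version B (the rewrite author's own statement) =====
-- stated objective: faster
-- what changed: Instead of materialising each 0/1 step-pattern list and summing it, B computes each candidate final value directly by the closed form c*a + (n-1-c)*b over c in range(n), then dedups and sorts.
import Mathlib
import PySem

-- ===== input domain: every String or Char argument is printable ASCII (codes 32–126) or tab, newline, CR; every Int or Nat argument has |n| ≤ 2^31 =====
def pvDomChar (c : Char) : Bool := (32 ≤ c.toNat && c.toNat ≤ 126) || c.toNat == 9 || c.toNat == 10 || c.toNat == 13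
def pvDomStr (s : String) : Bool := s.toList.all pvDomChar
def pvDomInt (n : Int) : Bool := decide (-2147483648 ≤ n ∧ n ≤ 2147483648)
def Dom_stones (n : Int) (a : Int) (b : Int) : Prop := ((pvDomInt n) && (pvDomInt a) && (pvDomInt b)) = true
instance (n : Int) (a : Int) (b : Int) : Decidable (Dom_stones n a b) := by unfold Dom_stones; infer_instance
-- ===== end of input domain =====

-- B replaces A's construction of explicit 0/1 step-pattern lists (and their summation)
-- by the closed form c*a + (n-1-c)*b for each count c of a-steps; objective: faster.

-- ===== PORT A =====
def stones (n : Int) (a : Int) (b : Int) : List Int :=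
  let width := n - 1
  let cases := ((PySem.List.pyRange 0 (width + 1) 1).foldl
    (fun (st : List (List Int) × Int) _i =>
      let c := st.2
      let plist : List Int := (PySem.List.pyRange 0 c 1).foldl (fun pl _j => pl ++ [1]) []
      let plist := (PySem.List.pyRange c width 1).foldl (fun pl _k => pl ++ [0]) plist
      (st.1 ++ [plist], c + 1)) ([], 0)).1
  let res := cases.foldl (fun r k =>
    r ++ [k.foldl (fun p i => if i ≠ 0 then p + a else p + b) 0]) []
  PySem.List.sorted (PySem.Set.ofList res) (fun x => x) false

-- ===== PORT B =====
def stones_alt (n : Int) (a : Int) (b : Int) : List Int :=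
  let width := n - 1
  PySem.List.sorted
    (PySem.Set.ofList ((PySem.List.pyRange 0 n 1).map (fun c => c * a + (width - c) * b)))
    (fun x => x) false

-- ===== PRECONDITION & SPEC =====
def Spec_stones (n : Int) (a : Int) (b : Int) (out : List Int) : Prop := out = stones_alt n a b
instance (n : Int) (a : Int) (b : Int) (out : List Int) : Decidable (Spec_stones n a b out) := by unfold Spec_stones; infer_instance

-- ===== CLAIM (what is proved, stated in full; the proofs are below) =====
def Claim_equal_stones : Prop := ∀ (n : Int) (a : Int) (b : Int), Dom_stones n a b → Spec_stones n a b (stones n a b)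

-- ===== LEMMAS AND PROOFS =====

-- the 'append one element per iteration' loops build a replicate
theorem pv_foldl_app_const {α β : Type} (x : β) :
    ∀ (l : List α) (pl : List β),
      l.foldl (fun pl _ => pl ++ [x]) pl = pl ++ List.replicate l.length x := by
  intro l
  induction l with
  | nil => intro pl; simp
  | cons h t ih =>
    intro pl
    simp [List.foldl_cons, ih, List.replicate_succ]

-- summing a block of ones
theorem pv_sum_ones (a b : Int) :
    ∀ (m : Nat) (s : Int),
      (List.replicate m (1:Int)).foldl
        (fun p i => if i ≠ 0 then p + a else p + b) s = s + m * a := by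
  intro m
  induction m with
  | zero => intro s; simp
  | succ m ihm =>
    intro s
    simp only [List.replicate_succ, List.foldl_cons]
    rw [ihm]
    norm_num
    ring

-- summing a block of zeros
theorem pv_sum_zeros (a b : Int) :
    ∀ (k : Nat) (s : Int),
      (List.replicate k (0:Int)).foldl
        (fun p i => if i ≠ 0 then p + a else p + b) s = s + k * b := by
  intro k
  induction k with
  | zero => intro s; simp
  | succ k ihk =>
    intro s
    simp only [List.replicate_succ, List.foldl_cons]
    rw [ihk]
    norm_num
    ring

-- summing a block of ones then zeros
theorem pv_sum_replicate (a b : Int) (m k : Nat) (s : Int) :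
      (List.replicate m (1:Int) ++ List.replicate k 0).foldl
        (fun p i => if i ≠ 0 then p + a else p + b) s = s + m * a + k * b := by
  rw [List.foldl_append, pv_sum_ones a b, pv_sum_zeros a b]

-- the outer loop: state (accumulated cases, counter)
theorem pv_outer_loop {γ : Type} (g : Int → γ) :
    ∀ (l : List Int) (acc : List γ) (c0 : Int),
      l.foldl (fun (st : List γ × Int) _ => (st.1 ++ [g st.2], st.2 + 1)) (acc, c0)
        = (acc ++ (List.range l.length).map (fun j : Nat => g (c0 + (j : Int))), c0 + l.length) := by
  intro l
  induction l with
  | nil => intro acc c0; simp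
  | cons h t ih =>
    intro acc c0
    simp only [List.foldl_cons, ih, List.length_cons]
    rw [List.range_succ_eq_map]
    simp only [List.map_cons, List.map_map, Nat.cast_zero, add_zero,
      List.append_assoc, List.singleton_append, Nat.cast_add, Nat.cast_one]
    refine Prod.ext ?_ ?_
    · simp only []
      congr 1
      congr 1
      apply List.map_congr_left
      intro j _
      simp only [Function.comp]
      congr 1
      push_cast
      ring
    · simp only []
      ring

-- collecting one value per element is a map
theorem pv_foldl_collect {α β : Type} (h : α → β) :
    ∀ (l : List α) (r : List β),
      l.foldl (fun r k => r ++ [h k]) r = r ++ l.map h := by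
  intro l
  induction l with
  | nil => intro r; simp
  | cons x t ih => intro r; simp [List.foldl_cons, ih]

-- ===== VERDICT (by name: the statement is the Claim_ definition above) =====
theorem stones_spec : Claim_equal_stones := by
  intro n a b _
  unfold Spec_stones stones stones_alt
  simp only []
  congr 1
  -- reduce to equality of the underlying lists of candidate values
  congr 1
  have houter := pv_outer_loop
    (fun c => (PySem.List.pyRange c (n-1) 1).foldl (fun pl _ => pl ++ [(0:Int)])
                ((PySem.List.pyRange 0 c 1).foldl (fun pl _ => pl ++ [(1:Int)]) []))
    (PySem.List.pyRange 0 (n - 1 + 1) 1) [] 0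
  rw [houter]
  rw [pv_foldl_collect]
  simp only [List.nil_append, List.map_map]
  rw [PySem.List.length_pyRange_one]
  rw [PySem.List.pyRange_one 0 n]
  simp only [List.map_map]
  have hto : (n - 1 + 1 - 0).toNat = (n - 0).toNat := by omega
  rw [hto]
  apply List.map_congr_left
  intro j hj
  have hjn : (j : Int) < n := by
    have := List.mem_range.mp hj
    omega
  simp only [Function.comp]
  rw [pv_foldl_app_const, pv_foldl_app_const]
  simp only [List.nil_append]
  rw [PySem.List.length_pyRange_one, PySem.List.length_pyRange_one]
  rw [pv_sum_replicate]
  have h1 : ((0:Int) + j - 0).toNat = j := by omega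
  have h2 : (((n - 1) - (0 + (j:Int))).toNat : Int) = n - 1 - j := by omega
  rw [h1]
  push_cast [h2]
  ring
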